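-- pv_equiv track=rewrite | github.com/ilyaderkatch/formal1 | main.py | update_words_len
-- ===== SOURCE A (Python) =====
-- def conc(set1, set2, k):
--     list1 = list(set1)
--     list2 = list(set2)
--     new_set = set()
--     for i in list1:
--         for j in list2:
--             new_set.add((i + j) % k)
--     return new_set
--
-- def gcd(m, n):
--     if m == 0:
--         return n
--     return gcd(n % m, m)
--
-- def degree(set_of_remains, k):
--     answer_set = set()
--     list_from_set = list(set_of_remains)
--     for i in list_from_set:
--         div = gcd(i, k)
--         for j in range(k // div + 1):
--             answer_set.add(i * j % k)
--     return answer_set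
--
-- def update_words_len(str, k):
--     stack = []
--     while len(str) > 0:
--         if str[0] == 'a' or str[0] == 'b' or str[0] == 'c':
--             stack.append({1})
--         elif str[0] == '1':
--             stack.append({0})
--         elif str[0] == '*':
--             if len(stack) == 0:
--                 return True, set()
--             set_from_stack = stack.pop()
--             stack.append(degree(set_from_stack, k))
--         elif str[0] == '+':
--             if len(stack) < 2:
--                 return True, set()
--             set1 = stack.pop()
--             set2 = stack.pop()
--             stack.append(set1 | set2)
--         elif str[0] == '.':
--             if len(stack) < 2:
--                 return True, set()
--             set1 = stack.pop()
--             set2 = stack.pop()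
--             stack.append(conc(set1, set2, k))
--         else:
--             return True, set()
--         str = str[1:]
--
--     if len(stack) == 1:
--         return False, stack[0]
--     else:
--         return True, set()
-- ===== SOURCE B (Python) =====
-- def conc(set1, set2, k):
--     list1 = list(set1)
--     list2 = list(set2)
--     new_set = set()
--     for i in list1:
--         for j in list2:
--             new_set.add((i + j) % k)
--     return new_set
--
-- def gcd(m, n):
--     if m == 0:
--         return n
--     return gcd(n % m, m)
--
-- def degree(set_of_remains, k):
--     answer_set = set()
--     list_from_set = list(set_of_remains)
--     for i in list_from_set:
--         div = gcd(i, k)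
--         for j in range(k // div + 1):
--             answer_set.add(i * j % k)
--     return answer_set
--
-- def _parse(s):
--     # one pass: build an expression tree (None on any malformed input)
--     stack = []
--     for ch in s:
--         if ch in ('a', 'b', 'c', '1'):
--             stack.append(('leaf', ch))
--         elif ch == '*':
--             if not stack:
--                 return None
--             stack.append(('star', stack.pop()))
--         elif ch in ('+', '.'):
--             if len(stack) < 2:
--                 return None
--             right = stack.pop()
--             left = stack.pop()
--             stack.append((ch, left, right))
--         else:
--             return None
--     if len(stack) != 1:
--         return None
--     return stack[0]
--
-- def _eval(t, k):
--     if t[0] == 'leaf':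
--         return {0} if t[1] == '1' else {1}
--     if t[0] == 'star':
--         return degree(_eval(t[1], k), k)
--     if t[0] == '+':
--         return _eval(t[2], k) | _eval(t[1], k)
--     return conc(_eval(t[2], k), _eval(t[1], k), k)
--
-- def update_words_len(str, k):
--     tree = _parse(str)
--     if tree is None:
--         return True, set()
--     return False, _eval(tree, k)
-- ===== Notes on version B (the rewrite author's own statement) =====
-- stated objective: faster
-- what changed: A interleaves parsing and evaluation in one stack loop that re-slices the string (str = str[1:]) each step; B iterates the characters once to parse the postfix string into an expression tree and then evaluates the tree by structural recursion (helpers conc/degree/gcd kept verbatim).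
import Mathlib
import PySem

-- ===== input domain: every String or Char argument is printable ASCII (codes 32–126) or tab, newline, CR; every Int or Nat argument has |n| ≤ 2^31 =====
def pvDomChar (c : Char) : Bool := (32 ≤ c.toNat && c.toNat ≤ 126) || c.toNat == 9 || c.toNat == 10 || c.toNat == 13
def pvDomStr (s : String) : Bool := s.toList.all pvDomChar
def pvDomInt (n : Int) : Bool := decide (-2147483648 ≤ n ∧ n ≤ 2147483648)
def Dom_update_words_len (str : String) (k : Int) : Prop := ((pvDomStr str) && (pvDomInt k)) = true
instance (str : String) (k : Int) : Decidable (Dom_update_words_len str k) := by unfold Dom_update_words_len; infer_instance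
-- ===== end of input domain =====

-- B re-decomposes A's single evaluate-while-scanning stack loop into a parse pass building an
-- expression tree (one pass over the chars, no repeated str[1:] slicing) followed by a recursive evaluator; same helpers, same results.

-- ===== PORT A =====
-- shared helpers (both Pythons contain conc/gcd/degree verbatim)

-- termination fact for the Python-style gcd: |n % m| < |m| when m ≠ 0 (Python mod has the divisor's sign)
theorem pyMod_natAbs_lt (n m : Int) (h : m ≠ 0) : (PySem.Int.mod n m).natAbs < m.natAbs := by
  rcases lt_or_gt_of_ne h with hm | hm
  · have := PySem.Int.mod_neg_bounds n hm
    omega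
  · have h1 := PySem.Int.mod_nonneg n hm
    have h2 := PySem.Int.mod_lt n hm
    omega

def pyGcd (m n : Int) : Int :=
  if h : m = 0 then n else pyGcd (PySem.Int.mod n m) m
termination_by m.natAbs
decreasing_by exact pyMod_natAbs_lt n m h

def conc (s1 s2 : List Int) (k : Int) : List Int :=
  s1.foldl (fun acc i =>
    s2.foldl (fun a j => PySem.Set.add a (PySem.Int.mod (i + j) k)) acc) PySem.Set.empty

def degree (s : List Int) (k : Int) : List Int :=
  s.foldl (fun acc i =>
    let div := pyGcd i k
    (PySem.List.pyRange 0 (PySem.Int.floordiv k div + 1) 1).foldl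
      (fun a j => PySem.Set.add a (PySem.Int.mod (i * j) k)) acc) PySem.Set.empty

-- A's loop: stack of sets, head = top of stack
def runA (s : List Char) (stack : List (List Int)) (k : Int) : Bool × List Int :=
  match s with
  | [] =>
    match stack with
    | [t] => (false, t)
    | _ => (true, [])
  | c :: rest =>
    if c = 'a' ∨ c = 'b' ∨ c = 'c' then runA rest (PySem.Set.ofList [1] :: stack) k
    else if c = '1' then runA rest (PySem.Set.ofList [0] :: stack) k
    else if c = '*' then
      match stack with
      | [] => (true, [])
      | t :: ts => runA rest (degree t k :: ts) k
    else if c = '+' then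
      match stack with
      | s1 :: s2 :: ts => runA rest (PySem.Set.union s1 s2 :: ts) k
      | _ => (true, [])
    else if c = '.' then
      match stack with
      | s1 :: s2 :: ts => runA rest (conc s1 s2 k :: ts) k
      | _ => (true, [])
    else (true, [])

def update_words_len (str : String) (k : Int) : Bool × List Int :=
  runA str.toList [] k

-- ===== PORT B =====
inductive RTree where
  | leaf : Char → RTree
  | star : RTree → RTree
  | plus : RTree → RTree → RTree
  | cat : RTree → RTree → RTree
deriving DecidableEq, Repr

-- B's parse pass: stack of trees; none = malformed (underflow, bad char, or not exactly one tree left)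
def parseB (s : List Char) (stack : List RTree) : Option RTree :=
  match s with
  | [] =>
    match stack with
    | [t] => some t
    | _ => none
  | c :: rest =>
    if c = 'a' ∨ c = 'b' ∨ c = 'c' ∨ c = '1' then parseB rest (RTree.leaf c :: stack)
    else if c = '*' then
      match stack with
      | [] => none
      | t :: ts => parseB rest (RTree.star t :: ts)
    else if c = '+' then
      match stack with
      | r :: l :: ts => parseB rest (RTree.plus l r :: ts)
      | _ => none
    else if c = '.' then
      match stack with
      | r :: l :: ts => parseB rest (RTree.cat l r :: ts)
      | _ => none
    else none

-- B's evaluator: structural recursion over the tree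
def evB (t : RTree) (k : Int) : List Int :=
  match t with
  | RTree.leaf c => if c = '1' then PySem.Set.ofList [0] else PySem.Set.ofList [1]
  | RTree.star t => degree (evB t k) k
  | RTree.plus l r => PySem.Set.union (evB r k) (evB l k)
  | RTree.cat l r => conc (evB r k) (evB l k) k

def update_words_len_alt (str : String) (k : Int) : Bool × List Int :=
  match parseB str.toList [] with
  | none => (true, [])
  | some t => (false, evB t k)

-- ===== PRECONDITION & SPEC =====
def Spec_update_words_len (str : String) (k : Int) (out : Bool × List Int) : Prop := out = update_words_len_alt str k
instance (str : String) (k : Int) (out : Bool × List Int) : Decidable (Spec_update_words_len str k out) := by unfold Spec_update_words_len; infer_instance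

-- ===== CLAIM (what is proved, stated in full; the proofs are below) =====
def Claim_equal_update_words_len : Prop := ∀ (str : String) (k : Int), Dom_update_words_len str k → Spec_update_words_len str k (update_words_len str k)

-- ===== LEMMAS AND PROOFS =====

-- A's stack run on the evaluations of a tree stack = parse-then-evaluate
theorem runA_eq_parse_eval (k : Int) (s : List Char) :
    ∀ ts : List RTree,
      runA s (ts.map (fun t => evB t k)) k =
        (match parseB s ts with
         | none => (true, [])
         | some t => (false, evB t k)) := by
  induction s with
  | nil =>
    intro ts
    match ts with
    | [] => simp [runA, parseB]
    | [t] => simp [runA, parseB]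
    | t1 :: t2 :: ts => simp [runA, parseB]
  | cons c rest ih =>
    intro ts
    by_cases h1 : c = 'a' ∨ c = 'b' ∨ c = 'c'
    · have hc1 : ¬ c = '1' := by rcases h1 with rfl | rfl | rfl <;> decide
      have habc : c = 'a' ∨ c = 'b' ∨ c = 'c' ∨ c = '1' := by tauto
      have := ih (RTree.leaf c :: ts)
      simp only [runA, parseB, h1, habc, if_pos]
      simpa [evB, hc1] using this
    · by_cases h2 : c = '1'
      · subst h2
        have := ih (RTree.leaf '1' :: ts)
        simp only [runA, parseB]
        norm_num
        simpa [evB] using this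
      · by_cases h3 : c = '*'
        · subst h3
          match ts with
          | [] => simp [runA, parseB]
          | t :: ts' =>
            have := ih (RTree.star t :: ts')
            simp only [runA, parseB]
            norm_num
            simpa [evB] using this
        · by_cases h4 : c = '+'
          · subst h4
            match ts with
            | [] => simp [runA, parseB]
            | [t] => simp [runA, parseB]
            | r :: l :: ts' =>
              have := ih (RTree.plus l r :: ts')
              simp only [runA, parseB]
              norm_num
              simpa [evB] using this
          · by_cases h5 : c = '.'
            · subst h5
              match ts with
              | [] => simp [runA, parseB]
              | [t] => simp [runA, parseB]
              | r :: l :: ts' =>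
                have := ih (RTree.cat l r :: ts')
                simp only [runA, parseB]
                norm_num
                simpa [evB] using this
            · simp [runA, parseB, h1, h2, h3, h4, h5]

-- ===== VERDICT (by name: the statement is the Claim_ definition above) =====
theorem update_words_len_spec : Claim_equal_update_words_len := by
  intro str k _
  unfold Spec_update_words_len update_words_len update_words_len_alt
  simpa using runA_eq_parse_eval k str.toList []
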